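-- pv_equiv track=rewrite | github.com/RajRudra06/IS_LAB_IT | LAB5/Q3.py | detect_collisions
-- ===== SOURCE A (Python) =====
-- def detect_collisions(hashes):
--     seen = {}
--     collisions = []
--     for s, h in hashes.items():
--         if h in seen:
--             collisions.append((seen[h], s, h))  # (original, duplicate, hash)
--         else:
--             seen[h] = s
--     return collisions
-- ===== SOURCE B (Python) =====
-- def detect_collisions(hashes):
--     # Two passes: first build a complete first-occurrence index hash -> first key,
--     # then emit, in items() order, every later key sharing a hash.
--     first = {}
--     for s, h in hashes.items():
--         if h not in first:
--             first[h] = s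
--     collisions = []
--     for s, h in hashes.items():
--         if first[h] != s:
--             collisions.append((first[h], s, h))
--     return collisions
-- ===== Notes on version B (the rewrite author's own statement) =====
-- stated objective: alternative
-- what changed: Replaces the single pass with an interleaved seen-dict and append by two separate passes: one builds a complete first-occurrence index hash->first key, a second pass over items() emits (first[h], s, h) for every key whose hash's first owner is a different key.
import Mathlib
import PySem

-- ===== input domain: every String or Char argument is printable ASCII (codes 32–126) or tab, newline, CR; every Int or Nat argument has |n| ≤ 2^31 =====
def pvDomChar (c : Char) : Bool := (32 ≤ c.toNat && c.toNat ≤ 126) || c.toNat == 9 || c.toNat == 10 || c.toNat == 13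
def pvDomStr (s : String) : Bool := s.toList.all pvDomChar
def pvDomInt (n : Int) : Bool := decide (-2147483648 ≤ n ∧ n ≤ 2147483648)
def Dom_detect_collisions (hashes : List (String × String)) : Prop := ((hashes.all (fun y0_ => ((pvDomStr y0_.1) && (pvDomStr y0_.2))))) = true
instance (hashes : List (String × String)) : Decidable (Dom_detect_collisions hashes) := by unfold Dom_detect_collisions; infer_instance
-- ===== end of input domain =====

-- B changes the decomposition: A detects collisions in one pass with an evolving seen-dict;
-- B builds the complete first-occurrence index in a first pass and emits in a second pass.

-- ===== PORT A =====
-- single pass: seen[h] exists whenever the branch reads it, so getD "" returns exactly seen[h]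
def detect_collisions (hashes : List (String × String)) : List (List String) :=
  ((PySem.Dict.ofList hashes).items.foldl
    (fun (st : PySem.Dict String String × List (List String)) sh =>
      if st.1.contains sh.2 then
        (st.1, st.2 ++ [[st.1.getD sh.2 "", sh.1, sh.2]])
      else
        (st.1.insert sh.2 sh.1, st.2))
    (PySem.Dict.empty, [])).2

-- ===== PORT B =====
-- first pass of Source B: first[h] = s only when h is absent
def pvFirstIndex (items : List (String × String)) : PySem.Dict String String :=
  items.foldl (fun d sh => if d.contains sh.2 then d else d.insert sh.2 sh.1) PySem.Dict.empty

def detect_collisions_alt (hashes : List (String × String)) : List (List String) :=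
  let items := (PySem.Dict.ofList hashes).items
  let first := pvFirstIndex items
  -- second pass: first[h] always exists (built from the same items), so getD "" is exact
  items.foldl
    (fun acc sh => if first.getD sh.2 "" ≠ sh.1 then acc ++ [[first.getD sh.2 "", sh.1, sh.2]] else acc)
    []

-- ===== PRECONDITION & SPEC =====
def Spec_detect_collisions (hashes : List (String × String)) (out : List (List String)) : Prop := out = detect_collisions_alt hashes
instance (hashes : List (String × String)) (out : List (List String)) : Decidable (Spec_detect_collisions hashes out) := by unfold Spec_detect_collisions; infer_instance

-- ===== CLAIM (what is proved, stated in full; the proofs are below) =====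
def Claim_equal_detect_collisions : Prop := ∀ (hashes : List (String × String)), Dom_detect_collisions hashes → Spec_detect_collisions hashes (detect_collisions hashes)

-- ===== LEMMAS AND PROOFS =====

-- A's loop restated as an emitting recursion over the items
def pvAemit (seen : PySem.Dict String String) : List (String × String) → List (List String)
  | [] => []
  | sh :: t =>
    if seen.contains sh.2 then
      [seen.getD sh.2 "", sh.1, sh.2] :: pvAemit seen t
    else
      pvAemit (seen.insert sh.2 sh.1) t

-- buildFirst continuing from an arbitrary dict (pvFirstIndex l = pvBuildFirst empty l)
def pvBuildFirst (d : PySem.Dict String String) (l : List (String × String)) : PySem.Dict String String :=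
  l.foldl (fun d sh => if d.contains sh.2 then d else d.insert sh.2 sh.1) d

theorem pvA_fold_eq (l : List (String × String)) (seen : PySem.Dict String String)
    (acc : List (List String)) :
    (l.foldl
      (fun (st : PySem.Dict String String × List (List String)) sh =>
        if st.1.contains sh.2 then
          (st.1, st.2 ++ [[st.1.getD sh.2 "", sh.1, sh.2]])
        else
          (st.1.insert sh.2 sh.1, st.2))
      (seen, acc)).2 = acc ++ pvAemit seen l := by
  induction l generalizing seen acc with
  | nil => simp [pvAemit]
  | cons sh t ih =>
    by_cases h : seen.contains sh.2
    · simp [pvAemit, h, ih, List.append_assoc]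
    · simp [pvAemit, h, ih]

theorem pvBuildFirst_getD_of_contains (l : List (String × String))
    (d : PySem.Dict String String) (k : String) (hk : d.contains k = true) :
    (pvBuildFirst d l).getD k "" = d.getD k "" := by
  induction l generalizing d with
  | nil => rfl
  | cons sh t ih =>
    by_cases h : d.contains sh.2
    · simpa [pvBuildFirst, h] using ih d hk
    · have hne : ¬(k = sh.2) := by
        intro e; rw [e] at hk; simp [h] at hk
      have hc' : (d.insert sh.2 sh.1).contains k = true := by
        simp [PySem.Dict.contains_insert, hk]
      have hstep : pvBuildFirst d (sh :: t) = pvBuildFirst (d.insert sh.2 sh.1) t := by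
        simp [pvBuildFirst, h]
      rw [hstep, ih (d.insert sh.2 sh.1) hc']
      simp [PySem.Dict.getD_insert, hne]

theorem pvGetD_mem_values (d : PySem.Dict String String) (k : String)
    (hk : d.contains k = true) : d.getD k "" ∈ d.values := by
  rcases hv : d.get? k with _ | v
  · rw [PySem.Dict.contains_eq_isSome_get?, hv] at hk; simp at hk
  · have hmem : (k, v) ∈ d.items := PySem.Dict.mem_items_of_get?_eq_some d hv
    have hval : d.getD k "" = v := PySem.Dict.getD_of_get?_eq_some d "" hv
    rw [hval]
    exact List.mem_map.2 ⟨(k, v), hmem, rfl⟩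

-- Main invariant: A's emitting loop over l from `seen` equals B's filtered pass
-- using the completed first-occurrence index, provided the key names are fresh.
theorem pvMain (l : List (String × String)) (seen : PySem.Dict String String)
    (hnd : (seen.values ++ l.map Prod.fst).Nodup) :
    pvAemit seen l =
      (l.filter (fun sh => decide ((pvBuildFirst seen l).getD sh.2 "" ≠ sh.1))).map
        (fun sh => [(pvBuildFirst seen l).getD sh.2 "", sh.1, sh.2]) := by
  induction l generalizing seen with
  | nil => rfl
  | cons sh t ih =>
    obtain ⟨s, h⟩ := sh
    by_cases hc : seen.contains h
    · have hBF : pvBuildFirst seen ((s, h) :: t) = pvBuildFirst seen t := by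
        simp [pvBuildFirst, hc]
      have hfh : (pvBuildFirst seen t).getD h "" = seen.getD h "" :=
        pvBuildFirst_getD_of_contains t seen h hc
      have hval : seen.getD h "" ∈ seen.values := pvGetD_mem_values seen h hc
      have hne : seen.getD h "" ≠ s := by
        intro e
        have hdisj := (List.nodup_append.1 hnd).2.2
        exact hdisj _ (e ▸ hval) _ (by simp) rfl
      have hnd' : (seen.values ++ t.map Prod.fst).Nodup := by
        refine hnd.sublist ?_
        simp only [List.map_cons]
        exact List.Sublist.append_left (List.sublist_cons_self _ _) _
      simp only [pvAemit, hc, if_true, hBF]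
      rw [ih seen hnd']
      simp [hfh, hne]
    · have hcf : seen.contains h = false := by simpa using hc
      have hBF : pvBuildFirst seen ((s, h) :: t) = pvBuildFirst (seen.insert h s) t := by
        simp [pvBuildFirst, hcf]
      have hcontains : (seen.insert h s).contains h = true := by
        simp
      have hfh : (pvBuildFirst (seen.insert h s) t).getD h "" = s := by
        rw [pvBuildFirst_getD_of_contains t (seen.insert h s) h hcontains]
        simp
      have hvals : (seen.insert h s).values = seen.values ++ [s] := by
        simp [PySem.Dict.values, PySem.Dict.items_insert, hcf]
      have hnd' : ((seen.insert h s).values ++ t.map Prod.fst).Nodup := by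
        rw [hvals, List.append_assoc]
        simpa using hnd
      simp only [pvAemit, hcf, Bool.false_eq_true, if_false, hBF]
      rw [ih (seen.insert h s) hnd']
      simp [hfh]

-- ===== VERDICT (by name: the statement is the Claim_ definition above) =====
theorem detect_collisions_spec : Claim_equal_detect_collisions := by
  intro hashes _
  unfold Spec_detect_collisions detect_collisions detect_collisions_alt
  rw [pvA_fold_eq, PySem.List.foldl_append_ite]
  simp only [List.nil_append]
  have hnd : ((PySem.Dict.empty (κ := String) (ν := String)).values ++
      (PySem.Dict.ofList hashes).items.map Prod.fst).Nodup := by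
    simpa [PySem.Dict.keys] using PySem.Dict.nodup_keys_ofList (ps := hashes)
  exact pvMain _ _ hnd
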